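-- pv_equiv track=rewrite | github.com/cirosantilli/project-euler-solvers | solvers/690.py | euler_transform
-- ===== SOURCE A (Python) =====
-- MOD = 1_000_000_007
--
-- def euler_transform(b: list[int], n: int) -> list[int]:
--     """
--     Euler transform for unlabeled multisets:
--       A(x) = Π_{k>=1} (1 - x^k)^(-b[k])
--     Given b[1..n], returns a[0..n] with a[0]=1.
--     """
--     mod = MOD
--     c = [0] * (n + 1)
--     for d in range(1, n + 1):
--         bd = b[d]
--         if bd == 0:
--             continue
--         addv = (d * bd) % mod
--         for k in range(d, n + 1, d):
--             c[k] += addv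
--             if c[k] >= mod:
--                 c[k] -= mod
--
--     inv = [0] * (n + 1)
--     for i in range(1, n + 1):
--         inv[i] = pow(i, mod - 2, mod)
--
--     a = [0] * (n + 1)
--     a[0] = 1
--     mod2 = mod * mod
--     for m in range(1, n + 1):
--         s = 0
--         for k in range(1, m + 1):
--             s += c[k] * a[m - k]
--             if s >= mod2:
--                 s %= mod
--         a[m] = (s % mod) * inv[m] % mod
--     return a
-- ===== SOURCE B (Python) =====
-- MOD = 1_000_000_007
--
-- def euler_transform(b: list[int], n: int) -> list[int]:
--     p = MOD
--     # c[k] = sum of d*b[d] over the divisors d of k, reduced mod p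
--     c = [0] + [sum(d * b[d] for d in range(1, k + 1) if k % d == 0) % p
--                for k in range(1, n + 1)]
--     a = [1]
--     for m in range(1, n + 1):
--         s = sum(c[k] * a[m - k] for k in range(1, m + 1))
--         a.append(s % p * pow(m, p - 2, p) % p)
--     return a
-- ===== Notes on version B (the rewrite author's own statement) =====
-- stated objective: alternative
-- what changed: c is computed per index as a direct divisor-sum comprehension instead of A's multiples sieve over a mutated array, modular inverses are computed on demand instead of A's precomputed Fermat table, and the output is grown by append from a plain sum reduced once mod p instead of A's preallocated array with the deferred mod*mod reduction trick.
import Mathlib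
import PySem

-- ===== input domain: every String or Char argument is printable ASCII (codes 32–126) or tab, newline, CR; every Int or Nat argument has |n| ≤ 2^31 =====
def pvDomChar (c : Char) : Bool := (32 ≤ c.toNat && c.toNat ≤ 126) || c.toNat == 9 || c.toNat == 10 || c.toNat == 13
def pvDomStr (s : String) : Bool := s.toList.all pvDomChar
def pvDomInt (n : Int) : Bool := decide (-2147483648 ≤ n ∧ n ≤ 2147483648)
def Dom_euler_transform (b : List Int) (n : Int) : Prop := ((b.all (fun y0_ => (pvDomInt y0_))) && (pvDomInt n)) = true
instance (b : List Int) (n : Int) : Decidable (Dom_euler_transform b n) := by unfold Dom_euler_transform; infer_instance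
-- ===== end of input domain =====

-- B replaces A's multiples sieve / Fermat inverse table / deferred-mod convolution by a per-index
-- divisor-sum comprehension, on-demand inverses and an append-built output: an alternative of the
-- same cost, proved to return the same list.


-- ===== PORT A =====
-- MOD = 1_000_000_007 (module constant, shared by both Pythons)
def etMOD : Int := 1000000007

-- 'c[k] += addv; if c[k] >= mod: c[k] -= mod' written as one update function
def etNorm (x : Int) : Int := if etMOD ≤ x then x - etMOD else x

-- 'for k in range(d, n+1, d): ...' (inner sieve loop of A)
def etSieveInner (n d addv : Int) (c : List Int) : List Int :=
  (PySem.List.pyRange d (n + 1) d).foldl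
    (fun c k => PySem.List.pySetD c k (etNorm (PySem.List.pyGetD c k 0 + addv))) c

-- 'for d in range(1, n+1): bd = b[d]; if bd == 0: continue; addv = d*bd % mod; <inner loop>'
def etSieve (b : List Int) (n : Int) (c : List Int) : List Int :=
  (PySem.List.pyRange 1 (n + 1) 1).foldl
    (fun c d =>
      if PySem.List.pyGetD b d 0 = 0 then c
      else etSieveInner n d (PySem.Int.mod (d * PySem.List.pyGetD b d 0) etMOD) c) c

-- 'for i in range(1, n+1): inv[i] = pow(i, mod-2, mod)'
def etInvTab (n : Int) (inv : List Int) : List Int :=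
  (PySem.List.pyRange 1 (n + 1) 1).foldl
    (fun inv i => PySem.List.pySetD inv i (PySem.Int.powMod i (etMOD - 2).toNat etMOD)) inv

-- 's = 0; for k in range(1, m+1): s += c[k]*a[m-k]; if s >= mod2: s %= mod'
def etConvA (c a : List Int) (m : Int) : Int :=
  (PySem.List.pyRange 1 (m + 1) 1).foldl
    (fun s k =>
      if etMOD * etMOD ≤ s + PySem.List.pyGetD c k 0 * PySem.List.pyGetD a (m - k) 0 then
        PySem.Int.mod (s + PySem.List.pyGetD c k 0 * PySem.List.pyGetD a (m - k) 0) etMOD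
      else s + PySem.List.pyGetD c k 0 * PySem.List.pyGetD a (m - k) 0) 0

def euler_transform (b : List Int) (n : Int) : List Int :=
  let c := etSieve b n (List.replicate (n + 1).toNat 0)
  let inv := etInvTab n (List.replicate (n + 1).toNat 0)
  (PySem.List.pyRange 1 (n + 1) 1).foldl
    (fun a m =>
      PySem.List.pySetD a m
        (PySem.Int.mod (PySem.Int.mod (etConvA c a m) etMOD * PySem.List.pyGetD inv m 0) etMOD))
    (PySem.List.pySetD (List.replicate (n + 1).toNat 0) 0 1)

-- ===== PORT B =====
-- 'sum(d * b[d] for d in range(1, k+1) if k % d == 0)'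
def etDivSum (b : List Int) (k : Int) : Int :=
  ((PySem.List.pyRange 1 (k + 1) 1).filter (fun d => PySem.Int.mod k d == 0)).foldl
    (fun s d => s + d * PySem.List.pyGetD b d 0) 0

-- 'c = [0] + [<divisor sum> % p for k in range(1, n+1)]'
def etCB (b : List Int) (n : Int) : List Int :=
  0 :: (PySem.List.pyRange 1 (n + 1) 1).map (fun k => PySem.Int.mod (etDivSum b k) etMOD)

-- 's = sum(c[k] * a[m-k] for k in range(1, m+1))'
def etConvB (c a : List Int) (m : Int) : Int :=
  (PySem.List.pyRange 1 (m + 1) 1).foldl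
    (fun s k => s + PySem.List.pyGetD c k 0 * PySem.List.pyGetD a (m - k) 0) 0

def euler_transform_alt (b : List Int) (n : Int) : List Int :=
  let c := etCB b n
  (PySem.List.pyRange 1 (n + 1) 1).foldl
    (fun a m =>
      a ++ [PySem.Int.mod
              (PySem.Int.mod (etConvB c a m) etMOD * PySem.Int.powMod m (etMOD - 2).toNat etMOD)
              etMOD])
    [1]

-- ===== PRECONDITION & SPEC =====
-- Pre_ excludes exactly the inputs where the Python A raises IndexError: negative n (a[0] = 1 on an
-- empty list) and 1 ≤ n with len(b) ≤ n (reading b[d] for d up to n).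
def Pre_euler_transform (b : List Int) (n : Int) : Prop :=
  0 ≤ n ∧ (n = 0 ∨ n < (b.length : Int))
instance (b : List Int) (n : Int) : Decidable (Pre_euler_transform b n) := by
  unfold Pre_euler_transform; infer_instance

def pvWitness_euler_transform : List Int × Int := ([0, 1, 1, 1], 3)

def Spec_euler_transform (b : List Int) (n : Int) (out : List Int) : Prop := out = euler_transform_alt b n
instance (b : List Int) (n : Int) (out : List Int) : Decidable (Spec_euler_transform b n out) := by
  unfold Spec_euler_transform; infer_instance

-- ===== CLAIM (what is proved, stated in full; the proofs are below) =====
def Claim_equal_euler_transform : Prop := ∀ (b : List Int) (n : Int), Dom_euler_transform b n → Pre_euler_transform b n → Spec_euler_transform b n (euler_transform b n)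

-- ===== LEMMAS AND PROOFS =====

lemma etMOD_pos : 0 < etMOD := by norm_num [etMOD]

lemma et_nodup_pyRange {a b s : Int} (hs : 0 < s) : (PySem.List.pyRange a b s).Nodup := by
  rw [PySem.List.pyRange_of_pos a b hs]
  refine List.Nodup.map (fun x y h => ?_) (List.nodup_range)
  have : s * (x : Int) = s * (y : Int) := by omega
  have := mul_left_cancel₀ (ne_of_gt hs) this
  exact_mod_cast this

lemma et_getD_setD (c : List Int) (x j v : Int) (hx0 : 0 ≤ x) (hxL : x < (c.length : Int))
    (hj : 0 ≤ j) :
    PySem.List.pyGetD (PySem.List.pySetD c x v) j 0 =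
      if j = x then v else PySem.List.pyGetD c j 0 := by
  rw [PySem.List.pySetD_of_nonneg c v hx0, PySem.List.pyGetD_of_nonneg _ 0 hj,
      PySem.List.pyGetD_of_nonneg _ 0 hj]
  by_cases h : j = x
  · subst h
    simp only [List.getD_eq_getElem?_getD]
    rw [List.getElem?_set_self (by omega)]
    simp
  · have hne : x.toNat ≠ j.toNat := by omega
    rw [if_neg h]
    simp [List.getD_eq_getElem?_getD, List.getElem?_set_ne hne]

lemma et_foldl_setD_length (F : Int → Int → Int) :
    ∀ (l : List Int) (c : List Int),
      (l.foldl (fun c k => PySem.List.pySetD c k (F k (PySem.List.pyGetD c k 0))) c).length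
        = c.length := by
  intro l
  induction l with
  | nil => intro c; rfl
  | cons x t ih => intro c; simp only [List.foldl_cons]; rw [ih]; simp [PySem.List.length_pySetD]

lemma et_foldl_setD_get (F : Int → Int → Int) :
    ∀ (l : List Int) (c : List Int) (j : Int), l.Nodup →
      (∀ x ∈ l, 0 ≤ x ∧ x < (c.length : Int)) → 0 ≤ j →
      PySem.List.pyGetD
          (l.foldl (fun c k => PySem.List.pySetD c k (F k (PySem.List.pyGetD c k 0))) c) j 0
        = if j ∈ l then F j (PySem.List.pyGetD c j 0) else PySem.List.pyGetD c j 0 := by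
  intro l
  induction l with
  | nil => intro c j _ _ _; simp
  | cons x t ih =>
    intro c j hnd hb hj
    obtain ⟨hx0, hxL⟩ := hb x (List.mem_cons_self ..)
    have hnd' := (List.nodup_cons.mp hnd)
    simp only [List.foldl_cons]
    rw [ih _ j hnd'.2 (fun y hy => by
        have := hb y (List.mem_cons_of_mem _ hy)
        simpa [PySem.List.length_pySetD] using this) hj]
    by_cases hjx : j = x
    · subst hjx
      have hjt : j ∉ t := hnd'.1
      simp [hjt, et_getD_setD c j j _ hx0 hxL hj]
    · rw [et_getD_setD c x j _ hx0 hxL hj, if_neg hjx]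
      by_cases hjt : j ∈ t <;> simp [hjt, hjx]

lemma et_norm_modeq (x : Int) : etNorm x ≡ x [ZMOD etMOD] := by
  unfold etNorm
  split
  · exact Int.sub_modulus_modEq_iff.mpr rfl
  · rfl

lemma et_norm_bounds (x : Int) (h0 : 0 ≤ x) (h1 : x < 2 * etMOD) :
    0 ≤ etNorm x ∧ etNorm x < etMOD := by
  simp only [etNorm, etMOD] at *
  split <;> omega

lemma et_mod_modeq (a : Int) : PySem.Int.mod a etMOD ≡ a [ZMOD etMOD] := by
  rw [PySem.Int.mod_eq_emod_of_pos etMOD_pos]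
  exact Int.emod_emod a etMOD

-- reference divisor sum: Σ_{d=1}^{D} (if d ∣ j ∧ d ≤ j then d·b[d] else 0)
def etS (b : List Int) (j D : Int) : Int :=
  ((PySem.List.pyRange 1 (D + 1) 1).map
    (fun d => if d ∣ j ∧ d ≤ j then d * PySem.List.pyGetD b d 0 else 0)).sum

lemma etS_succ (b : List Int) (j D : Int) (hD : 0 ≤ D) :
    etS b j (D + 1) = etS b j D +
      (if (D + 1) ∣ j ∧ (D + 1) ≤ j then (D + 1) * PySem.List.pyGetD b (D + 1) 0 else 0) := by
  unfold etS
  rw [PySem.List.pyRange_one_succ_right (by omega : (1:Int) ≤ D + 1)]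
  simp

lemma et_dvd_sub_self (d j : Int) : d ∣ j - d ↔ d ∣ j := by
  constructor
  · intro h; have := dvd_add h (dvd_refl d); simpa using this
  · intro h; exact dvd_sub h (dvd_refl d)

lemma etSieveInner_length (n d addv : Int) (c : List Int) :
    (etSieveInner n d addv c).length = c.length :=
  et_foldl_setD_length (fun _ v => etNorm (v + addv)) _ c

lemma etSieveInner_get (n d addv : Int) (c : List Int) (hd : 0 < d)
    (hlen : c.length = (n + 1).toNat) (hn : 0 ≤ n) (j : Int) (hj0 : 0 ≤ j) (hjn : j ≤ n) :
    PySem.List.pyGetD (etSieveInner n d addv c) j 0 =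
      if d ∣ j ∧ d ≤ j then etNorm (PySem.List.pyGetD c j 0 + addv)
      else PySem.List.pyGetD c j 0 := by
  unfold etSieveInner
  rw [et_foldl_setD_get (fun _ v => etNorm (v + addv)) _ c j (et_nodup_pyRange hd)
      (fun x hx => by
        rw [PySem.List.mem_pyRange_iff_of_pos hd] at hx
        refine ⟨by omega, ?_⟩
        rw [hlen]
        omega) hj0]
  have hmem : j ∈ PySem.List.pyRange d (n + 1) d ↔ (d ∣ j ∧ d ≤ j) := by
    rw [PySem.List.mem_pyRange_iff_of_pos hd, et_dvd_sub_self]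
    constructor
    · rintro ⟨h1, _, h3⟩; exact ⟨h3, h1⟩
    · rintro ⟨h1, h2⟩; exact ⟨h2, by omega, h1⟩
  rw [if_congr hmem rfl rfl]

def etSieveUpTo (b : List Int) (n D : Int) : List Int :=
  (PySem.List.pyRange 1 (D + 1) 1).foldl
    (fun c d =>
      if PySem.List.pyGetD b d 0 = 0 then c
      else etSieveInner n d (PySem.Int.mod (d * PySem.List.pyGetD b d 0) etMOD) c)
    (List.replicate (n + 1).toNat 0)

lemma etSieveUpTo_eq_sieve (b : List Int) (n : Int) :
    etSieve b n (List.replicate (n + 1).toNat 0) = etSieveUpTo b n n := rfl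

lemma etSieveUpTo_spec (b : List Int) (n : Int) (hn : 0 ≤ n) :
    ∀ (D : Nat), (D : Int) ≤ n →
      (etSieveUpTo b n D).length = (n + 1).toNat ∧
      ∀ j : Int, 0 ≤ j → j ≤ n →
        0 ≤ PySem.List.pyGetD (etSieveUpTo b n D) j 0 ∧
        PySem.List.pyGetD (etSieveUpTo b n D) j 0 < etMOD ∧
        PySem.List.pyGetD (etSieveUpTo b n D) j 0 ≡ etS b j D [ZMOD etMOD] := by
  intro D
  induction D with
  | zero =>
    intro _
    simp only [Nat.cast_zero]
    have h0 : etSieveUpTo b n 0 = List.replicate (n + 1).toNat 0 := by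
      unfold etSieveUpTo
      rw [PySem.List.pyRange_one_eq_nil (by omega)]
      rfl
    refine ⟨by simp [h0], fun j hj0 hjn => ?_⟩
    have hg : PySem.List.pyGetD (etSieveUpTo b n 0) j 0 = 0 := by
      rw [h0, PySem.List.pyGetD_of_nonneg _ 0 hj0]
      simp only [List.getD_eq_getElem?_getD, List.getElem?_replicate]
      split <;> rfl
    have hS : etS b j 0 = 0 := by
      unfold etS
      rw [show (0:Int) + 1 = 1 from rfl, PySem.List.pyRange_one_eq_nil (by omega)]
      rfl
    rw [hg, hS]
    exact ⟨le_refl 0, etMOD_pos, Int.ModEq.refl 0⟩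
  | succ t ih =>
    intro hD1
    simp only [Nat.cast_add, Nat.cast_one]
    have ht : (t : Int) ≤ n := by push_cast at hD1 ⊢; omega
    obtain ⟨ihlen, ihval⟩ := ih ht
    have hstep : etSieveUpTo b n (t + 1) =
        (if PySem.List.pyGetD b ((t:Int)+1) 0 = 0 then etSieveUpTo b n t
         else etSieveInner n ((t:Int)+1)
           (PySem.Int.mod (((t:Int)+1) * PySem.List.pyGetD b ((t:Int)+1) 0) etMOD)
           (etSieveUpTo b n t)) := by
      unfold etSieveUpTo
      rw [show ((t:Nat)+1 : Int) + 1 = ((t:Int) + 1) + 1 by norm_cast,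
          PySem.List.pyRange_one_succ_right (by omega : (1:Int) ≤ (t:Int) + 1),
          List.foldl_append]
      rfl
    set d : Int := (t:Int) + 1 with hd
    by_cases hbd : PySem.List.pyGetD b d 0 = 0
    · rw [hstep, if_pos hbd]
      refine ⟨ihlen, fun j hj0 hjn => ?_⟩
      obtain ⟨h1, h2, h3⟩ := ihval j hj0 hjn
      refine ⟨h1, h2, ?_⟩
      have : etS b j ((t:Int) + 1) = etS b j t := by
        rw [etS_succ b j t (by omega), hbd]
        simp
      rw [this]
      exact h3
    · rw [hstep, if_neg hbd]
      have hlen2 := etSieveInner_length n d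
        (PySem.Int.mod (d * PySem.List.pyGetD b d 0) etMOD) (etSieveUpTo b n t)
      refine ⟨by rw [hlen2, ihlen], fun j hj0 hjn => ?_⟩
      obtain ⟨h1, h2, h3⟩ := ihval j hj0 hjn
      rw [etSieveInner_get n d _ _ (by omega) ihlen hn j hj0 hjn]
      have haddv0 : 0 ≤ PySem.Int.mod (d * PySem.List.pyGetD b d 0) etMOD :=
        PySem.Int.mod_nonneg _ etMOD_pos
      have haddv1 : PySem.Int.mod (d * PySem.List.pyGetD b d 0) etMOD < etMOD :=
        PySem.Int.mod_lt _ etMOD_pos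
      have hSsucc : etS b j ((t:Int) + 1) = etS b j t +
          (if d ∣ j ∧ d ≤ j then d * PySem.List.pyGetD b d 0 else 0) :=
        etS_succ b j t (by omega)
      rw [hSsucc]
      by_cases hc : d ∣ j ∧ d ≤ j
      · rw [if_pos hc, if_pos hc]
        obtain ⟨hb0, hb1⟩ := et_norm_bounds
          (PySem.List.pyGetD (etSieveUpTo b n t) j 0 +
            PySem.Int.mod (d * PySem.List.pyGetD b d 0) etMOD) (by omega) (by omega)
        refine ⟨hb0, hb1, ?_⟩
        calc etNorm (PySem.List.pyGetD (etSieveUpTo b n t) j 0 +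
                PySem.Int.mod (d * PySem.List.pyGetD b d 0) etMOD)
            ≡ PySem.List.pyGetD (etSieveUpTo b n t) j 0 +
                PySem.Int.mod (d * PySem.List.pyGetD b d 0) etMOD [ZMOD etMOD] :=
              et_norm_modeq _
          _ ≡ etS b j t + d * PySem.List.pyGetD b d 0 [ZMOD etMOD] :=
              Int.ModEq.add h3 (et_mod_modeq _)
      · rw [if_neg hc, if_neg hc]
        exact ⟨h1, h2, by simpa using h3⟩

lemma et_sum_ite_filter (l : List Int) (p : Int → Bool) (g : Int → Int) :
    (l.map (fun d => if p d then g d else 0)).sum = ((l.filter p).map g).sum := by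
  induction l with
  | nil => simp
  | cons x t ih => by_cases h : p x <;> simp [h, ih]

lemma etDivSum_eq_sum (b : List Int) (k : Int) :
    etDivSum b k =
      (((PySem.List.pyRange 1 (k + 1) 1).filter (fun d => PySem.Int.mod k d == 0)).map
        (fun d => d * PySem.List.pyGetD b d 0)).sum := by
  unfold etDivSum
  rw [PySem.List.foldl_add]
  ring

lemma etS_zero (b : List Int) (D : Int) : etS b 0 D = 0 := by
  unfold etS
  apply List.sum_eq_zero
  intro x hx
  simp only [List.mem_map] at hx
  obtain ⟨d, hd, hx⟩ := hx
  rw [PySem.List.mem_pyRange_one] at hd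
  rw [← hx, if_neg (by omega : ¬((d : Int) ∣ 0 ∧ d ≤ 0))]

lemma etS_eq_divSum (b : List Int) (n j : Int) (h1 : 1 ≤ j) (hj : j ≤ n) :
    etS b j n = etDivSum b j := by
  unfold etS
  rw [PySem.List.pyRange_one_append 1 (j + 1) (n + 1) (by omega) (by omega),
      List.map_append, List.sum_append]
  have h2 : ((PySem.List.pyRange (j + 1) (n + 1) 1).map
      (fun d => if d ∣ j ∧ d ≤ j then d * PySem.List.pyGetD b d 0 else 0)).sum = 0 := by
    apply List.sum_eq_zero
    intro x hx
    simp only [List.mem_map] at hx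
    obtain ⟨d, hd, hx⟩ := hx
    rw [PySem.List.mem_pyRange_one] at hd
    rw [← hx, if_neg (by omega : ¬(d ∣ j ∧ d ≤ j))]
  rw [h2, add_zero, etDivSum_eq_sum, ← et_sum_ite_filter]
  congr 1
  apply List.map_congr_left
  intro d hd
  rw [PySem.List.mem_pyRange_one] at hd
  by_cases hdvd : d ∣ j
  · rw [if_pos ⟨hdvd, by omega⟩, if_pos]
    simpa [beq_iff_eq] using (PySem.Int.mod_eq_zero_iff_dvd j d).mpr hdvd
  · rw [if_neg (by tauto), if_neg]
    simp only [beq_iff_eq, PySem.Int.mod_eq_zero_iff_dvd]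
    exact hdvd

lemma etCB_length (b : List Int) (n : Int) (_hn : 0 ≤ n) :
    (etCB b n).length = (n + 1).toNat := by
  unfold etCB
  simp [PySem.List.length_pyRange_one]
  omega

lemma etCB_get (b : List Int) (n j : Int) (_hn : 0 ≤ n) (h1 : 1 ≤ j) (hj : j ≤ n) :
    PySem.List.pyGetD (etCB b n) j 0 = PySem.Int.mod (etDivSum b j) etMOD := by
  unfold etCB
  rw [PySem.List.pyGetD_of_nonneg _ 0 (by omega)]
  have hjt : j.toNat = (j.toNat - 1) + 1 := by omega
  rw [hjt, List.getD_cons_succ]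
  have hlt : j.toNat - 1 < ((PySem.List.pyRange 1 (n + 1) 1).map
      (fun k => PySem.Int.mod (etDivSum b k) etMOD)).length := by
    simp [PySem.List.length_pyRange_one]
    omega
  rw [List.getD_eq_getElem _ _ hlt]
  simp only [List.getElem_map, PySem.List.getElem_pyRange_one]
  have hidx : (1 : Int) + ((j.toNat - 1 : Nat) : Int) = j := by omega
  rw [hidx]

lemma et_c_eq (b : List Int) (n : Int) (hn : 0 ≤ n) :
    etSieve b n (List.replicate (n + 1).toNat 0) = etCB b n := by
  rw [etSieveUpTo_eq_sieve]
  have hnn : ((n.toNat : Nat) : Int) = n := Int.toNat_of_nonneg hn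
  obtain ⟨hlen, hval⟩ := etSieveUpTo_spec b n hn n.toNat (by omega)
  rw [hnn] at hlen hval
  apply List.ext_getElem
  · rw [hlen, etCB_length b n hn]
  · intro i hi1 hi2
    have hiI : (0:Int) ≤ (i:Int) ∧ (i:Int) ≤ n := by
      constructor
      · omega
      · have : i < (n+1).toNat := by rw [← hlen]; exact hi1
        omega
    obtain ⟨hA0, hA1, hA2⟩ := hval (i:Int) hiI.1 hiI.2
    have hgA : PySem.List.pyGetD (etSieveUpTo b n n) (i:Int) 0 = (etSieveUpTo b n n)[i] := by
      rw [PySem.List.pyGetD_natCast, List.getD_eq_getElem _ _ hi1]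
    have hgB : PySem.List.pyGetD (etCB b n) (i:Int) 0 = (etCB b n)[i] := by
      rw [PySem.List.pyGetD_natCast, List.getD_eq_getElem _ _ hi2]
    rw [← hgA, ← hgB]
    by_cases hi0 : i = 0
    · subst hi0
      have hB : PySem.List.pyGetD (etCB b n) 0 0 = 0 := by
        unfold etCB; exact PySem.List.pyGetD_zero_cons ..
      rw [show ((0:Nat):Int) = 0 from rfl] at hA2 ⊢
      rw [hB]
      simp only [Nat.cast_zero] at hA0 hA1
      rw [etS_zero] at hA2
      unfold Int.ModEq at hA2
      rw [Int.emod_eq_of_lt hA0 hA1] at hA2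
      simpa using hA2
    · have h1i : 1 ≤ (i:Int) := by omega
      rw [etCB_get b n (i:Int) hn h1i hiI.2]
      rw [← etS_eq_divSum b n (i:Int) h1i hiI.2]
      have hval' : PySem.List.pyGetD (etSieveUpTo b n n) (i:Int) 0 % etMOD =
          etS b (i:Int) n % etMOD := hA2
      rw [PySem.Int.mod_eq_emod_of_pos etMOD_pos]
      rw [← hval']
      exact (Int.emod_eq_of_lt hA0 hA1).symm

lemma etInvTab_get (n : Int) (hn : 0 ≤ n) (j : Int) (h1 : 1 ≤ j) (hj : j ≤ n) :
    PySem.List.pyGetD (etInvTab n (List.replicate (n + 1).toNat 0)) j 0 =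
      PySem.Int.powMod j (etMOD - 2).toNat etMOD := by
  unfold etInvTab
  rw [et_foldl_setD_get (fun i _ => PySem.Int.powMod i (etMOD - 2).toNat etMOD)
      (PySem.List.pyRange 1 (n + 1) 1) (List.replicate (n + 1).toNat 0) j
      (et_nodup_pyRange one_pos)
      (fun x hx => by
        rw [PySem.List.mem_pyRange_one] at hx
        simp only [List.length_replicate]
        omega) (by omega)]
  rw [if_pos (by rw [PySem.List.mem_pyRange_one]; omega)]

lemma et_conv_modeq (l : List Int) (g : Int → Int) :
    ∀ (s s' : Int), s ≡ s' [ZMOD etMOD] →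
      l.foldl (fun s k =>
          if etMOD * etMOD ≤ s + g k then PySem.Int.mod (s + g k) etMOD else s + g k) s
        ≡ l.foldl (fun s k => s + g k) s' [ZMOD etMOD] := by
  induction l with
  | nil => intro s s' h; simpa using h
  | cons x t ih =>
    intro s s' h
    simp only [List.foldl_cons]
    apply ih
    split
    · exact (et_mod_modeq _).trans (h.add_right (g x))
    · exact h.add_right (g x)

lemma et_main_partial (n : Int) (hn : 0 ≤ n) (c inv : List Int)
    (hinv : ∀ m : Int, 1 ≤ m → m ≤ n →
      PySem.List.pyGetD inv m 0 = PySem.Int.powMod m (etMOD - 2).toNat etMOD) :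
    ∀ (t : Nat), (t : Int) ≤ n →
      ((PySem.List.pyRange 1 ((t : Int) + 1) 1).foldl
          (fun a m => PySem.List.pySetD a m
            (PySem.Int.mod
              (PySem.Int.mod (etConvA c a m) etMOD * PySem.List.pyGetD inv m 0) etMOD))
          (PySem.List.pySetD (List.replicate (n + 1).toNat 0) 0 1))
        = ((PySem.List.pyRange 1 ((t : Int) + 1) 1).foldl
            (fun a m => a ++ [PySem.Int.mod
              (PySem.Int.mod (etConvB c a m) etMOD *
                PySem.Int.powMod m (etMOD - 2).toNat etMOD) etMOD]) [1])
            ++ List.replicate (n.toNat - t) 0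
      ∧ ((PySem.List.pyRange 1 ((t : Int) + 1) 1).foldl
            (fun a m => a ++ [PySem.Int.mod
              (PySem.Int.mod (etConvB c a m) etMOD *
                PySem.Int.powMod m (etMOD - 2).toNat etMOD) etMOD]) [1]).length = t + 1 := by
  intro t
  induction t with
  | zero =>
    intro _
    simp only [Nat.cast_zero, zero_add, PySem.List.pyRange_one_eq_nil (le_refl (1:Int)),
      List.foldl_nil, Nat.sub_zero]
    constructor
    · rw [PySem.List.pySetD_of_nonneg _ _ (le_refl 0)]
      have : (n + 1).toNat = n.toNat + 1 := by omega
      rw [this, List.replicate_succ]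
      rfl
    · rfl
  | succ t ih =>
    intro hD1
    simp only [Nat.cast_add, Nat.cast_one]
    have ht : (t : Int) ≤ n := by omega
    obtain ⟨ihA, ihlen⟩ := ih ht
    set m : Int := (t : Int) + 1 with hm
    have hsplit : PySem.List.pyRange 1 (m + 1) 1 = PySem.List.pyRange 1 m 1 ++ [m] :=
      PySem.List.pyRange_one_succ_right (by omega)
    rw [hsplit, List.foldl_append, List.foldl_append]
    simp only [List.foldl_cons, List.foldl_nil]
    set Bt := (PySem.List.pyRange 1 m 1).foldl
      (fun a m => a ++ [PySem.Int.mod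
        (PySem.Int.mod (etConvB c a m) etMOD *
          PySem.Int.powMod m (etMOD - 2).toNat etMOD) etMOD]) [1] with hBt
    rw [ihA]
    -- reads of the A-list agree with reads of Bt on the convolution window
    have hreads : ∀ k : Int, k ∈ PySem.List.pyRange 1 (m + 1) 1 →
        PySem.List.pyGetD (Bt ++ List.replicate (n.toNat - t) 0) (m - k) 0
          = PySem.List.pyGetD Bt (m - k) 0 := by
      intro k hk
      rw [PySem.List.mem_pyRange_one] at hk
      rw [PySem.List.pyGetD_of_nonneg _ 0 (by omega), PySem.List.pyGetD_of_nonneg _ 0 (by omega)]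
      exact List.getD_append _ _ 0 _ (by rw [ihlen]; omega)
    have hconv : PySem.Int.mod (etConvA c (Bt ++ List.replicate (n.toNat - t) 0) m) etMOD
        = PySem.Int.mod (etConvB c Bt m) etMOD := by
      unfold etConvA etConvB
      have hcongr : (PySem.List.pyRange 1 (m + 1) 1).foldl
          (fun s k =>
            if etMOD * etMOD ≤ s + PySem.List.pyGetD c k 0 *
                PySem.List.pyGetD (Bt ++ List.replicate (n.toNat - t) 0) (m - k) 0 then
              PySem.Int.mod (s + PySem.List.pyGetD c k 0 *
                PySem.List.pyGetD (Bt ++ List.replicate (n.toNat - t) 0) (m - k) 0) etMOD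
            else s + PySem.List.pyGetD c k 0 *
                PySem.List.pyGetD (Bt ++ List.replicate (n.toNat - t) 0) (m - k) 0) 0
          = (PySem.List.pyRange 1 (m + 1) 1).foldl
          (fun s k =>
            if etMOD * etMOD ≤ s + PySem.List.pyGetD c k 0 * PySem.List.pyGetD Bt (m - k) 0 then
              PySem.Int.mod (s + PySem.List.pyGetD c k 0 * PySem.List.pyGetD Bt (m - k) 0) etMOD
            else s + PySem.List.pyGetD c k 0 * PySem.List.pyGetD Bt (m - k) 0) 0 := by
        apply PySem.List.foldl_congr_mem
        intro acc x hx
        rw [hreads x hx]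
      rw [hcongr]
      have := et_conv_modeq (PySem.List.pyRange 1 (m + 1) 1)
        (fun k => PySem.List.pyGetD c k 0 * PySem.List.pyGetD Bt (m - k) 0) 0 0
        (Int.ModEq.refl 0)
      rw [PySem.Int.mod_eq_emod_of_pos etMOD_pos, PySem.Int.mod_eq_emod_of_pos etMOD_pos]
      exact this
    rw [hconv, hinv m (by omega) (by omega)]
    constructor
    · -- the set lands exactly at the end of Bt
      rw [PySem.List.pySetD_of_nonneg _ _ (by omega : (0:Int) ≤ m)]
      have hmt : m.toNat = t + 1 := by omega
      have hrep : n.toNat - t = (n.toNat - (t + 1)) + 1 := by omega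
      rw [hmt, hrep, List.replicate_succ,
          List.set_append_right _ _ (by rw [ihlen] : Bt.length ≤ t + 1)]
      rw [ihlen]
      simp
    · rw [List.length_append, ihlen]
      simp

-- ===== VERDICT (by name: the statement is the Claim_ definition above) =====
theorem euler_transform_spec : Claim_equal_euler_transform := by
  intro b n _ hpre
  obtain ⟨hn, -⟩ := hpre
  unfold Spec_euler_transform euler_transform euler_transform_alt
  simp only []
  rw [et_c_eq b n hn]
  have key := et_main_partial n hn (etCB b n)
    (etInvTab n (List.replicate (n + 1).toNat 0))
    (fun m h1 h2 => etInvTab_get n hn m h1 h2) n.toNat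
    (by rw [Int.toNat_of_nonneg hn])
  rw [Int.toNat_of_nonneg hn] at key
  obtain ⟨hEq, -⟩ := key
  rw [hEq]
  simp
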